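-- pv_equiv track=rewrite | github.com/AhmadBadruAlHusaeni/webSismul | image_utils.py | get_range_info
-- ===== SOURCE A (Python) =====
-- def get_range_info(diff):
--     ranges = [(7, 2), (15, 3), (31, 4), (63, 5), (127, 6), (255, 7)]
--     for upper, bits_to_embed in ranges:
--         if diff <= upper:
--             lower = 0
--             if ranges.index((upper, bits_to_embed)) > 0:
--                 lower = ranges[ranges.index((upper, bits_to_embed)) - 1][0] + 1
--             return lower, upper, bits_to_embed
--     return 0, 255, 8
-- ===== SOURCE B (Python) =====
-- def get_range_info(diff):
--     if diff <= 7: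
--         return 0, 7, 2
--     if diff > 255:
--         return 0, 255, 8
--     k = diff.bit_length()  # 4..8 here
--     return 1 << (k - 1), (1 << k) - 1, k - 1
-- ===== Notes on version B (the rewrite author's own statement) =====
-- stated objective: idiomatic
-- what changed: Replaced the table scan with its repeated list.index re-scans by a closed form: guard the lowest band and the overflow band, otherwise derive (lower, upper, bits) directly from diff.bit_length().
import Mathlib
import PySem

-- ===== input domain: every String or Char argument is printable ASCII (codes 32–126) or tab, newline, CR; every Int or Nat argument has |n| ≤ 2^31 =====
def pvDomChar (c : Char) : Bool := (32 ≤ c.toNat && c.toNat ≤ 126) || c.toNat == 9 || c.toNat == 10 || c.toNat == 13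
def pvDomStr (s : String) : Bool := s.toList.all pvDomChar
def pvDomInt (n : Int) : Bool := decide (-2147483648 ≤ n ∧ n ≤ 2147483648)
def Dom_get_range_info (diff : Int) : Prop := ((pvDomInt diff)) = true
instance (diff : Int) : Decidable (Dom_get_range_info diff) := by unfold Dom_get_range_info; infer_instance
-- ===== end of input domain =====

-- B replaces A's table scan (with its repeated list.index re-scans) by a closed form from diff.bit_length(); same values, no table.

-- ===== PORT A =====
def griRanges : List (Int × Int) := [(7, 2), (15, 3), (31, 4), (63, 5), (127, 6), (255, 7)]

-- the `for upper, bits in ranges:` loop; `ranges.index((upper, bits))` always succeeds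
-- (the pair comes from the list), so `.getD 0` / `.getD (0,0)` are exact here
def griLoop (diff : Int) : List (Int × Int) → Int × Int × Int
  | [] => (0, 255, 8)
  | (upper, bits) :: rest =>
    if diff ≤ upper then
      let idx : Nat := (PySem.List.index? griRanges (upper, bits)).getD 0
      let lower : Int :=
        if idx > 0 then ((PySem.List.pyGet? griRanges ((idx : Int) - 1)).getD (0, 0)).1 + 1
        else 0
      (lower, upper, bits)
    else griLoop diff rest

def get_range_info (diff : Int) : Int × Int × Int := griLoop diff griRanges

-- ===== PORT B =====
def get_range_info_alt (diff : Int) : Int × Int × Int :=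
  if diff ≤ 7 then (0, 7, 2)
  else if diff > 255 then (0, 255, 8)
  else
    let k : Nat := PySem.Int.bitLength diff   -- diff.bit_length(); here 4 ≤ k ≤ 8
    ((2 : Int) ^ (k - 1), (2 : Int) ^ k - 1, (k : Int) - 1)

-- ===== PRECONDITION & SPEC =====
def Spec_get_range_info (diff : Int) (out : Int × Int × Int) : Prop := out = get_range_info_alt diff
instance (diff : Int) (out : Int × Int × Int) : Decidable (Spec_get_range_info diff out) := by unfold Spec_get_range_info; infer_instance

-- ===== CLAIM (what is proved, stated in full; the proofs are below) =====
def Claim_equal_get_range_info : Prop := ∀ (diff : Int), Dom_get_range_info diff → Spec_get_range_info diff (get_range_info diff)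

-- ===== LEMMAS AND PROOFS =====

-- pin bit_length on an interval: 2^k ≤ n < 2^(k+1) → bit_length n = k+1
theorem gri_bitLength_eq (n : Int) (k : Nat) (h1 : (2 : Int) ^ k ≤ n) (h2 : n < (2 : Int) ^ (k + 1)) :
    PySem.Int.bitLength n = k + 1 := by
  have hpos : (0:Int) < n := lt_of_lt_of_le (by positivity) h1
  have hn0 : n ≠ 0 := ne_of_gt hpos
  have hlow := PySem.Int.two_pow_bitLength_le n hn0
  have hhigh := PySem.Int.lt_two_pow_bitLength n
  have habs : n.natAbs = n.toNat := by omega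
  have hnat1 : 2 ^ k ≤ n.natAbs := by
    have : ((2:Int) ^ k) = ((2 ^ k : Nat) : Int) := by push_cast; ring
    omega
  have hnat2 : n.natAbs < 2 ^ (k + 1) := by
    have : ((2:Int) ^ (k+1)) = ((2 ^ (k+1) : Nat) : Int) := by push_cast; ring
    omega
  set b := PySem.Int.bitLength n with hb
  have hb1 : b - 1 < k + 1 := by
    have := lt_of_le_of_lt hlow hnat2
    exact (Nat.pow_lt_pow_iff_right (by norm_num)).mp this
  have hb2 : k < b := by
    have := lt_of_le_of_lt hnat1 hhigh
    exact (Nat.pow_lt_pow_iff_right (by norm_num)).mp this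
  omega

theorem get_range_info_spec : Claim_equal_get_range_info := by
  intro diff _
  unfold Spec_get_range_info get_range_info get_range_info_alt
  by_cases h7 : diff ≤ 7
  · norm_num [griLoop, griRanges, h7, PySem.List.index?, PySem.List.pyGet?]
    all_goals decide
  · by_cases h15 : diff ≤ 15
    · have hk := gri_bitLength_eq diff 3 (by omega) (by omega)
      have hno : ¬ 255 < diff := by omega
      norm_num [griLoop, griRanges, h7, h15, hk, hno, PySem.List.index?, PySem.List.pyGet?]
      all_goals decide
    · by_cases h31 : diff ≤ 31
      · have hk := gri_bitLength_eq diff 4 (by omega) (by omega)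
        have hno : ¬ 255 < diff := by omega
        norm_num [griLoop, griRanges, h7, h15, h31, hk, hno, PySem.List.index?, PySem.List.pyGet?]
        all_goals decide
      · by_cases h63 : diff ≤ 63
        · have hk := gri_bitLength_eq diff 5 (by omega) (by omega)
          have hno : ¬ 255 < diff := by omega
          norm_num [griLoop, griRanges, h7, h15, h31, h63, hk, hno, PySem.List.index?, PySem.List.pyGet?]
          all_goals decide
        · by_cases h127 : diff ≤ 127
          · have hk := gri_bitLength_eq diff 6 (by omega) (by omega)
            have hno : ¬ 255 < diff := by omega
            norm_num [griLoop, griRanges, h7, h15, h31, h63, h127, hk, hno, PySem.List.index?, PySem.List.pyGet?]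
            all_goals decide
          · by_cases h255 : diff ≤ 255
            · have hk := gri_bitLength_eq diff 7 (by omega) (by omega)
              have hno : ¬ 255 < diff := by omega
              norm_num [griLoop, griRanges, h7, h15, h31, h63, h127, h255, hk, hno, PySem.List.index?, PySem.List.pyGet?]
              all_goals decide
            · norm_num [griLoop, griRanges, h7, h15, h31, h63, h127, h255, (by omega : 255 < diff)]
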